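-- pv_equiv track=rewrite | github.com/Nauhai/aoc-2020 | day10/day10.py | solve_problem1
-- ===== SOURCE A (Python) =====
-- def solve_problem1(adapters):
--     diff1 = 0
--     diff3 = 0
--     for a, b in [adapters[i:i + 2] for i in range(len(adapters) - 1)]:
--         diff = b - a
--         if diff == 1:
--             diff1 += 1
--         elif diff == 3:
--             diff3 += 1
--     return diff1 * diff3
-- ===== SOURCE B (Python) =====
-- def _segment_counts(xs, lo, hi):
--     # (#diffs == 1, #diffs == 3) among adjacent pairs (i, i+1) for lo <= i < hi,
--     # by divide and conquer on the index range.
--     if hi - lo <= 0: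
--         return (0, 0)
--     if hi - lo == 1:
--         d = xs[lo + 1] - xs[lo]
--         return (1 if d == 1 else 0, 1 if d == 3 else 0)
--     mid = (lo + hi) // 2
--     a1, a3 = _segment_counts(xs, lo, mid)
--     b1, b3 = _segment_counts(xs, mid, hi)
--     return (a1 + b1, a3 + b3)
--
-- def solve_problem1(adapters):
--     d1, d3 = _segment_counts(adapters, 0, len(adapters) - 1)
--     return d1 * d3
-- ===== Notes on version B (the rewrite author's own statement) =====
-- stated objective: alternative
-- what changed: B counts the adjacent differences equal to 1 and 3 by divide and conquer on the index range (split at the midpoint, combine by adding the two half-counts) instead of A's left-to-right slice-comprehension loop with two branching accumulators.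
import Mathlib
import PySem

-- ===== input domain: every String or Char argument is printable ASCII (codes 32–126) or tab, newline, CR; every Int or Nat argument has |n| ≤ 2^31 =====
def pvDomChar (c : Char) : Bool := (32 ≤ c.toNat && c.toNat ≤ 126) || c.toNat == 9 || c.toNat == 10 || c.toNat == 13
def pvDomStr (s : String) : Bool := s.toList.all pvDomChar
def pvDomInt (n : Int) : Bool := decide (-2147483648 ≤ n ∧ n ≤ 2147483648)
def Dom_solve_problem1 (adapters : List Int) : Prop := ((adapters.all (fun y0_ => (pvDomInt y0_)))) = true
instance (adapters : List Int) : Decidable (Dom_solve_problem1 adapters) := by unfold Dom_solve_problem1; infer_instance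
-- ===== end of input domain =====

-- B counts the two kinds of adjacent differences by divide and conquer on the index range instead of A's branching left-to-right loop; objective: alternative.

-- ===== PORT A =====
def solve_problem1 (adapters : List Int) : Int :=
  let pairs := (PySem.List.pyRange 0 ((adapters.length : Int) - 1) 1).map
      (fun i => PySem.List.slice adapters (some i) (some (i + 2)))
  let r := pairs.foldl (fun (s : Int × Int) p =>
      match p with
      | [a, b] =>
          let diff := b - a
          if diff = 1 then (s.1 + 1, s.2)
          else if diff = 3 then (s.1, s.2 + 1)
          else s
      | _ => s) (0, 0)
  r.1 * r.2

-- ===== PORT B =====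
-- xs[lo] / xs[lo+1]: B only ever calls itself with 0 ≤ lo < hi ≤ len-1, so the
-- indices are always in range; the `.getD 0` default is never reached.
def segmentCounts (xs : List Int) (lo hi : Int) : Int × Int :=
  if _h0 : hi - lo ≤ 0 then (0, 0)
  else if _h1 : hi - lo = 1 then
    let d := (PySem.List.pyGet? xs (lo + 1)).getD 0 - (PySem.List.pyGet? xs lo).getD 0
    ((if d = 1 then 1 else 0), (if d = 3 then 1 else 0))
  else
    let mid := PySem.Int.floordiv (lo + hi) 2
    let a := segmentCounts xs lo mid
    let b := segmentCounts xs mid hi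
    (a.1 + b.1, a.2 + b.2)
termination_by (hi - lo).toNat
decreasing_by
  · rw [PySem.Int.floordiv_eq_ediv_of_pos (by omega)]; omega
  · rw [PySem.Int.floordiv_eq_ediv_of_pos (by omega)]; omega

def solve_problem1_alt (adapters : List Int) : Int :=
  let r := segmentCounts adapters 0 ((adapters.length : Int) - 1)
  r.1 * r.2

-- ===== PRECONDITION & SPEC =====
def Spec_solve_problem1 (adapters : List Int) (out : Int) : Prop := out = solve_problem1_alt adapters
instance (adapters : List Int) (out : Int) : Decidable (Spec_solve_problem1 adapters out) := by unfold Spec_solve_problem1; infer_instance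

-- ===== CLAIM (what is proved, stated in full; the proofs are below) =====
def Claim_equal_solve_problem1 : Prop := ∀ (adapters : List Int), Dom_solve_problem1 adapters → Spec_solve_problem1 adapters (solve_problem1 adapters)

-- ===== LEMMAS AND PROOFS =====

-- The list of consecutive differences.
def dmap (xs : List Int) : List Int := (xs.zip xs.tail).map (fun p => p.2 - p.1)

theorem dmap_length (xs : List Int) : (dmap xs).length = xs.length - 1 := by
  simp [dmap, List.length_zip, List.length_tail]

-- A's slice comprehension produces exactly the consecutive pairs, as 2-element lists.
theorem pairs_eq_zip (l : List Int) :
    (PySem.List.pyRange 0 ((l.length : Int) - 1) 1).map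
      (fun i => PySem.List.slice l (some i) (some (i + 2)))
    = (l.zip l.tail).map (fun p => [p.1, p.2]) := by
  rw [PySem.List.pyRange_one]
  apply List.ext_getElem
  · simp [List.length_zip, List.length_tail]
  · intro k h1 h2
    simp only [List.getElem_map, List.getElem_range, List.getElem_zip, List.getElem_tail]
    have hk : k + 1 < l.length := by
      simp [List.length_zip, List.length_tail] at h2
      omega
    rw [zero_add, show ((k : Int) + 2) = ((k : Int) + (2 : Nat)) by push_cast; ring,
      PySem.List.slice_natCast_add]
    have h : l.drop k = l[k] :: l[k+1] :: l.drop (k + 2) := by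
      rw [List.drop_eq_getElem_cons (by omega)]
      congr 1
      rw [List.drop_eq_getElem_cons (by omega)]
    rw [h]
    rfl

-- Fold characterization: A's loop counts diffs equal to 1 and 3.
theorem fold_counts (zs : List (Int × Int)) (c1 c3 : Int) :
    (zs.map (fun p => [p.1, p.2])).foldl (fun (s : Int × Int) p =>
      match p with
      | [a, b] =>
          let diff := b - a
          if diff = 1 then (s.1 + 1, s.2)
          else if diff = 3 then (s.1, s.2 + 1)
          else s
      | _ => s) (c1, c3)
    = (c1 + ((zs.map (fun p => p.2 - p.1)).count 1 : Int),
       c3 + ((zs.map (fun p => p.2 - p.1)).count 3 : Int)) := by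
  induction zs generalizing c1 c3 with
  | nil => simp
  | cons z zs ih =>
    simp only [List.map_cons, List.foldl_cons, List.count_cons]
    by_cases h1 : z.2 - z.1 = 1
    · simp [h1, ih]; ring
    · by_cases h3 : z.2 - z.1 = 3
      · simp [h3, ih]; ring
      · simp [h1, h3, ih]

-- The diff list entry: dmap xs gets xs[k+1] - xs[k].
theorem dmap_getElem (xs : List Int) (k : Nat) (h : k < (dmap xs).length) :
    (dmap xs)[k] = xs[k + 1]'(by rw [dmap_length] at h; omega)
      - xs[k]'(by rw [dmap_length] at h; omega) := by
  simp [dmap, List.getElem_zip, List.getElem_tail]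

-- B's recursion computes the counts of 1 and 3 over the segment [lo, hi) of the diff list.
theorem segmentCounts_eq (xs : List Int) :
    ∀ (n : Nat) (lo hi : Int), 0 ≤ lo → hi ≤ ((dmap xs).length : Int) → (hi - lo).toNat = n →
    segmentCounts xs lo hi
      = (((((dmap xs).drop lo.toNat).take (hi - lo).toNat).count 1 : Int),
         ((((dmap xs).drop lo.toNat).take (hi - lo).toNat).count 3 : Int)) := by
  intro n
  induction n using Nat.strong_induction_on with
  | _ n ih =>
    intro lo hi hlo hhi hn
    rw [segmentCounts]
    by_cases h0 : hi - lo ≤ 0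
    · simp [h0, Int.toNat_of_nonpos h0]
    · simp only [dif_neg h0]
      by_cases h1 : hi - lo = 1
      · rw [dif_pos h1, h1]
        have hlt : lo.toNat < (dmap xs).length := by omega
        have hlen : lo.toNat + 1 < xs.length := by have := dmap_length xs; omega
        rw [PySem.List.pyGet?_eq_some_getElem xs (by omega : (0:Int) ≤ lo + 1) (by omega),
            PySem.List.pyGet?_eq_some_getElem xs hlo (by omega)]
        have ht : (lo + 1).toNat = lo.toNat + 1 := by omega
        simp only [ht, Option.getD_some]
        have hseg : ((dmap xs).drop lo.toNat).take (Int.toNat 1) = [(dmap xs)[lo.toNat]] := by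
          rw [List.drop_eq_getElem_cons hlt]; rfl
        rw [hseg, dmap_getElem xs lo.toNat hlt]
        by_cases e1 : xs[lo.toNat + 1]'(by omega) - xs[lo.toNat]'(by omega) = 1
        · simp [e1]
        · by_cases e3 : xs[lo.toNat + 1]'(by omega) - xs[lo.toNat]'(by omega) = 3
          · simp [e3]
          · simp [e1, e3]
      · rw [dif_neg h1]
        have h2 : 2 ≤ hi - lo := by omega
        have hmid : PySem.Int.floordiv (lo + hi) 2 = (lo + hi) / 2 :=
          PySem.Int.floordiv_eq_ediv_of_pos (by omega)
        have hb1 : lo < PySem.Int.floordiv (lo + hi) 2 := by rw [hmid]; omega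
        have hb2 : PySem.Int.floordiv (lo + hi) 2 < hi := by rw [hmid]; omega
        generalize hg : PySem.Int.floordiv (lo + hi) 2 = mid at hb1 hb2 ⊢
        rw [ih (mid - lo).toNat (by omega) lo mid hlo (by omega) rfl,
            ih (hi - mid).toNat (by omega) mid hi (by omega) hhi rfl]
        have hsplit : ((dmap xs).drop lo.toNat).take (hi - lo).toNat
            = ((dmap xs).drop lo.toNat).take (mid - lo).toNat
              ++ ((dmap xs).drop mid.toNat).take (hi - mid).toNat := by
          have hadd : (hi - lo).toNat = (mid - lo).toNat + (hi - mid).toNat := by omega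
          rw [hadd, List.take_add, List.drop_drop,
            show lo.toNat + (mid - lo).toNat = mid.toNat by omega]
        rw [hsplit]
        simp [List.count_append]
-- ===== VERDICT (by name: the statement is the Claim_ definition above) =====
theorem solve_problem1_spec : Claim_equal_solve_problem1 := by
  intro adapters _
  unfold Spec_solve_problem1 solve_problem1 solve_problem1_alt
  rw [pairs_eq_zip]
  have h := fold_counts (adapters.zip adapters.tail) 0 0
  simp only [h]
  rw [segmentCounts_eq adapters ((((adapters.length : Int) - 1) - 0).toNat) 0
        ((adapters.length : Int) - 1) le_rfl (by rw [dmap_length]; omega) rfl]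
  have hfull : ((dmap adapters).drop (0 : Int).toNat).take (((adapters.length : Int) - 1) - 0).toNat
      = dmap adapters := by
    rw [Int.toNat_zero, List.drop_zero, List.take_of_length_le]
    rw [dmap_length]; omega
  rw [hfull]
  simp [dmap]
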